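-- pv_equiv track=rewrite | github.com/Evergreenies/algorithms | python_algorithms/daily_condig_problem/01198_find_denominations.py | find_the_denominations
-- ===== SOURCE A (Python) =====
-- def find_the_denominations(coins: list[int]) -> set[int]:
--     denominations = set()
--     for index in range(2, len(coins)):
--         if coins[index] > 0:
--             denominations.add(index)
--
--             index_j = 1
--             while index_j < index:
--                 if coins[index_j] > 0 and coins[index - index_j] > 0:
--                     denominations.add(index_j)
--                     denominations.add(index - index_j)
--
--                 index_j += 1
--
--     return denominations
-- ===== SOURCE B (Python) =====
-- def find_the_denominations(coins: list[int]) -> set[int]: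
--     # Every summand j >= 2 that A discovers via its inner pair scan is itself a
--     # valid index with coins[j] > 0, so it is already collected by the outer
--     # scan; the only extra element the pair scan can contribute is 1, which
--     # appears exactly when position one holds a positive coin and two adjacent positive positions
--     # i-1, i exist; so the inner pair scan reduces to one adjacent-pair check.
--     denominations = set()
--     for i in range(2, len(coins)):
--         if coins[i] > 0:
--             denominations.add(i)
--             if coins[1] > 0 and coins[i - 1] > 0:
--                 denominations.add(1)
--     return denominations
-- ===== Notes on version B (the rewrite author's own statement) =====
-- stated objective: alternative
-- what changed: Replaced A's inner pair scan over all j < index by a single adjacent-pair check: every summand >= 2 that the pair scan finds is already added by the outer scan, so only the element one needs the check that position one and position i-1 hold positive coins.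
import Mathlib
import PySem

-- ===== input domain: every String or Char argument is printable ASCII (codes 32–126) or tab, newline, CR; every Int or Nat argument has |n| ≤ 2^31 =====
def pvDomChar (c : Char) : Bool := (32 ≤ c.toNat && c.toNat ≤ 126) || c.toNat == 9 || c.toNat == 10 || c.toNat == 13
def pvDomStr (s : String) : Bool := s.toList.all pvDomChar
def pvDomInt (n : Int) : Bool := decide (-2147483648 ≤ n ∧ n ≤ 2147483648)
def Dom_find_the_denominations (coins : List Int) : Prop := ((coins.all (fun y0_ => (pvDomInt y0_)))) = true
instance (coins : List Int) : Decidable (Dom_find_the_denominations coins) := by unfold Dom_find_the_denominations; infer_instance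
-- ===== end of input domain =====

-- B replaces A's inner pair scan by a single adjacent-pair check: every summand >= 2 that the
-- pair scan finds is already added by the outer index scan, so only element 1 needs checking.


-- ===== PORT A =====
-- coins[k]: every index reached is in range, so pyGetD is exact here
def pvGet (coins : List Int) (i : Int) : Int := PySem.List.pyGetD coins i 0

-- the 'while index_j < index' loop of A
def pvInnerA (coins : List Int) (index : Int) (index_j : Int) (s : PySem.Set Int) : PySem.Set Int :=
  if h : index_j < index then
    let s' := if pvGet coins index_j > 0 ∧ pvGet coins (index - index_j) > 0
              then PySem.Set.add (PySem.Set.add s index_j) (index - index_j) else s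
    pvInnerA coins index (index_j + 1) s'
  else s
termination_by (index - index_j).toNat
decreasing_by omega

def find_the_denominations (coins : List Int) : List Int :=
  (PySem.List.pyRange 2 (PySem.List.len coins) 1).foldl
    (fun s index =>
      if pvGet coins index > 0 then pvInnerA coins index 1 (PySem.Set.add s index) else s)
    PySem.Set.empty

-- ===== PORT B =====
def find_the_denominations_alt (coins : List Int) : List Int :=
  (PySem.List.pyRange 2 (PySem.List.len coins) 1).foldl
    (fun s i =>
      if pvGet coins i > 0 then
        let s' := PySem.Set.add s i
        if pvGet coins 1 > 0 ∧ pvGet coins (i - 1) > 0 then PySem.Set.add s' 1 else s'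
      else s)
    PySem.Set.empty

-- ===== PRECONDITION & SPEC =====
def Spec_find_the_denominations (coins : List Int) (out : List Int) : Prop := out = find_the_denominations_alt coins
instance (coins : List Int) (out : List Int) : Decidable (Spec_find_the_denominations coins out) := by unfold Spec_find_the_denominations; infer_instance

-- ===== CLAIM (what is proved, stated in full; the proofs are below) =====
def Claim_equal_find_the_denominations : Prop := ∀ (coins : List Int), Dom_find_the_denominations coins → Spec_find_the_denominations coins (find_the_denominations coins)

-- ===== LEMMAS AND PROOFS =====

-- invariant: before processing index b, every k ∈ [2, b) with coins[k] > 0 is already in s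
def pvInv (coins : List Int) (b : Int) (s : List Int) : Prop :=
  ∀ k : Int, 2 ≤ k → k < b → pvGet coins k > 0 → k ∈ s

lemma pvInv_mono {coins : List Int} {b : Int} {s : List Int} (h : pvInv coins b s) (x : Int) :
    pvInv coins b (PySem.Set.add s x) := by
  intro k h2 hb hp
  exact (PySem.Set.mem_add _ _ _).mpr (Or.inl (h k h2 hb hp))

-- once 1 is (conditionally) present, the pair scan adds nothing new
lemma pvInnerA_noop (coins : List Int) (i j : Int) (s : List Int)
    (hj : 2 ≤ j) (hinv : pvInv coins i s)
    (h1 : pvGet coins 1 > 0 → pvGet coins (i - 1) > 0 → (1 : Int) ∈ s) :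
    pvInnerA coins i j s = s := by
  by_cases h : j < i
  · rw [pvInnerA, dif_pos h]
    have hstep : (if pvGet coins j > 0 ∧ pvGet coins (i - j) > 0
        then PySem.Set.add (PySem.Set.add s j) (i - j) else s) = s := by
      split_ifs with hc
      · have hjmem : j ∈ s := hinv j hj h hc.1
        have hadd1 : PySem.Set.add s j = s := PySem.Set.add_of_mem hjmem
        rw [hadd1]
        by_cases hij : i - j = 1
        · have : (1 : Int) ∈ s := h1 (by rw [hij] at hc; exact hc.2) (by
            have : i - 1 = j := by omega
            rw [this]; exact hc.1)
          rw [hij]; exact PySem.Set.add_of_mem this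
        · have : i - j ∈ s := hinv (i - j) (by omega) (by omega) hc.2
          exact PySem.Set.add_of_mem this
      · rfl
    rw [hstep]
    exact pvInnerA_noop coins i (j + 1) s (by omega) hinv h1
  · rw [pvInnerA, dif_neg h]
termination_by (i - j).toNat
decreasing_by omega

-- the whole pair scan equals B's adjacent-pair check
lemma pvInnerA_eq (coins : List Int) (i : Int) (s : List Int)
    (hi : 2 ≤ i) (hinv : pvInv coins i s) :
    pvInnerA coins i 1 s =
      (if pvGet coins 1 > 0 ∧ pvGet coins (i - 1) > 0 then PySem.Set.add s 1 else s) := by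
  rw [pvInnerA, dif_pos (by omega : (1 : Int) < i)]
  by_cases hc : pvGet coins 1 > 0 ∧ pvGet coins (i - 1) > 0
  · rw [if_pos hc, if_pos hc]
    have hsnd : PySem.Set.add (PySem.Set.add s 1) (i - 1) = PySem.Set.add s 1 := by
      by_cases hi2 : i = 2
      · subst hi2
        exact PySem.Set.add_of_mem ((PySem.Set.mem_add _ _ _).mpr (Or.inr (by norm_num)))
      · have : (i - 1) ∈ s := hinv (i - 1) (by omega) (by omega) hc.2
        exact PySem.Set.add_of_mem ((PySem.Set.mem_add _ _ _).mpr (Or.inl this))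
    rw [hsnd]
    exact pvInnerA_noop coins i 2 _ (by omega) (pvInv_mono hinv 1)
      (fun _ _ => (PySem.Set.mem_add _ _ _).mpr (Or.inr rfl))
  · rw [if_neg hc, if_neg hc]
    exact pvInnerA_noop coins i 2 s (by omega) hinv (fun h1 h2 => absurd ⟨h1, h2⟩ hc)

-- the two outer folds agree from any start point a ≥ 2 under the invariant
lemma pvFold_eq (coins : List Int) (a b : Int) (s : List Int)
    (ha : 2 ≤ a) (hinv : pvInv coins a s) :
    (PySem.List.pyRange a b 1).foldl
      (fun s index =>
        if pvGet coins index > 0 then pvInnerA coins index 1 (PySem.Set.add s index) else s) s =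
    (PySem.List.pyRange a b 1).foldl
      (fun s i =>
        if pvGet coins i > 0 then
          let s' := PySem.Set.add s i
          if pvGet coins 1 > 0 ∧ pvGet coins (i - 1) > 0 then PySem.Set.add s' 1 else s'
        else s) s := by
  by_cases hab : a < b
  · rw [PySem.List.pyRange_one_cons hab]
    simp only [List.foldl_cons]
    by_cases hp : pvGet coins a > 0
    · rw [if_pos hp, if_pos hp]
      rw [pvInnerA_eq coins a (PySem.Set.add s a) ha (pvInv_mono hinv a)]
      have hinv' : pvInv coins (a + 1)
          (if pvGet coins 1 > 0 ∧ pvGet coins (a - 1) > 0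
           then PySem.Set.add (PySem.Set.add s a) 1 else PySem.Set.add s a) := by
        intro k h2 hb hpk
        have hk : k ∈ PySem.Set.add s a := by
          by_cases hka : k = a
          · exact (PySem.Set.mem_add _ _ _).mpr (Or.inr hka)
          · exact (PySem.Set.mem_add _ _ _).mpr (Or.inl (hinv k h2 (by omega) hpk))
        split_ifs
        · exact (PySem.Set.mem_add _ _ _).mpr (Or.inl hk)
        · exact hk
      exact pvFold_eq coins (a + 1) b _ (by omega) hinv'
    · rw [if_neg hp, if_neg hp]
      have hinv' : pvInv coins (a + 1) s := by
        intro k h2 hb hpk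
        by_cases hka : k = a
        · subst hka; exact absurd hpk hp
        · exact hinv k h2 (by omega) hpk
      exact pvFold_eq coins (a + 1) b s (by omega) hinv'
  · rw [PySem.List.pyRange_one_eq_nil (by omega)]; rfl
termination_by (b - a).toNat
decreasing_by all_goals omega

-- ===== VERDICT (by name: the statement is the Claim_ definition above) =====
theorem find_the_denominations_spec : Claim_equal_find_the_denominations := by
  intro coins _
  unfold Spec_find_the_denominations find_the_denominations find_the_denominations_alt
  exact pvFold_eq coins 2 (PySem.List.len coins) PySem.Set.empty (le_refl 2)
    (fun k h2 hb _ => absurd (lt_of_le_of_lt h2 hb) (lt_irrefl 2))
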